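-- pv_equiv track=rewrite | github.com/IAAR-Shanghai/Grimoire | analyst.py | what_task_is_this_output
-- ===== SOURCE A (Python) =====
-- from typing import List, Tuple
--
-- def what_task_is_this_output(output_name: str, tasks: List[str]) -> str:
--     """Return the task name given the output name."""
--     possible_tasks = []
--     for task in tasks:
--         if task in output_name:
--             possible_tasks.append(task)
--     if len(possible_tasks) == 1:
--         return possible_tasks[0]
--     elif len(possible_tasks) > 1:
--         return max(possible_tasks, key=len)
--     else:
--         return 'unknown'
-- ===== SOURCE B (Python) =====
-- def what_task_is_this_output(output_name, tasks):
--     """Return the task name given the output name (sort by length desc, first substring match)."""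
--     for task in sorted(tasks, key=len, reverse=True):
--         if task in output_name:
--             return task
--     return 'unknown'
-- ===== Notes on version B (the rewrite author's own statement) =====
-- stated objective: faster
-- what changed: Replaces A's filter-then-branch-then-max(key=len) with a stable sort of tasks by length descending followed by returning the first task that is a substring of output_name; stability makes ties resolve to the same task as max(key=len), and the early return skips the remaining substring tests once a match is found.
import Mathlib
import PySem

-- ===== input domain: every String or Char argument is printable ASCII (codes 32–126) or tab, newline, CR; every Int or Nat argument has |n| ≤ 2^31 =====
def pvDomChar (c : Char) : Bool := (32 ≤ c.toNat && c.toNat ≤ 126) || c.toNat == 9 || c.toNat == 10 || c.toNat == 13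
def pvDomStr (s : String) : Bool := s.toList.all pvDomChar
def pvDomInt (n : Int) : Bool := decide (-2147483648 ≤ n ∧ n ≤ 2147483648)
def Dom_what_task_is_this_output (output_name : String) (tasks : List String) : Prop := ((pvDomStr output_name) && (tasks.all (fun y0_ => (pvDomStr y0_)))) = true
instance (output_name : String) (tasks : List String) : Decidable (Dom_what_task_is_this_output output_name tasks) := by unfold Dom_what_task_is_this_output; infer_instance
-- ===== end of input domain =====

-- B replaces A's filter-list + length-branching + max(key=len) with a stable sort of the tasks
-- by length descending followed by returning the first substring match; objective: alternative.

-- ===== PORT A =====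
def what_task_is_this_output (output_name : String) (tasks : List String) : String :=
  let possible_tasks := tasks.foldl
    (fun acc task => if PySem.Str.isIn task output_name then acc ++ [task] else acc) []
  if possible_tasks.length = 1 then possible_tasks.headD ""
  else if possible_tasks.length > 1 then
    (PySem.List.max? possible_tasks (fun t => PySem.Str.len t)).getD "unknown"
  else "unknown"

-- ===== PORT B =====
def what_task_is_this_output_alt (output_name : String) (tasks : List String) : String :=
  match (PySem.List.sorted tasks (fun t => PySem.Str.len t) true).find?
      (fun task => PySem.Str.isIn task output_name) with
  | some task => task
  | none => "unknown"

-- ===== PRECONDITION & SPEC =====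
def Spec_what_task_is_this_output (output_name : String) (tasks : List String) (out : String) : Prop := out = what_task_is_this_output_alt output_name tasks
instance (output_name : String) (tasks : List String) (out : String) : Decidable (Spec_what_task_is_this_output output_name tasks out) := by unfold Spec_what_task_is_this_output; infer_instance

-- ===== CLAIM (what is proved, stated in full; the proofs are below) =====
def Claim_equal_what_task_is_this_output : Prop := ∀ (output_name : String) (tasks : List String), Dom_what_task_is_this_output output_name tasks → Spec_what_task_is_this_output output_name tasks (what_task_is_this_output output_name tasks)

-- ===== LEMMAS AND PROOFS =====

-- running-max step (first of equal keys wins), shared by the lemmas below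
def pvStep {α : Type} (key : α → Int) (best : Option α) (x : α) : Option α :=
  match best with
  | none => some x
  | some b => if key b < key x then some x else some b

-- A's collecting loop is filter.
theorem pv_foldl_append_filter {α : Type} (p : α → Bool) (l : List α) (acc : List α) :
    l.foldl (fun a x => if p x then a ++ [x] else a) acc = acc ++ l.filter p := by
  induction l generalizing acc with
  | nil => simp
  | cons x t ih => by_cases h : p x <;> simp [h, ih]

-- a fold that skips non-p elements is the same fold over the filtered list
theorem pv_foldl_if_filter {α β : Type} (p : α → Bool) (g : β → α → β) (l : List α) (acc : β) :
    l.foldl (fun b x => if p x then g b x else b) acc = (l.filter p).foldl g acc := by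
  induction l generalizing acc with
  | nil => rfl
  | cons x t ih => by_cases h : p x <;> simp [h, ih]

theorem pv_foldl_ext {α β : Type} (f g : β → α → β) (h : ∀ b a, f b a = g b a)
    (l : List α) (acc : β) : l.foldl f acc = l.foldl g acc := by
  induction l generalizing acc with
  | nil => rfl
  | cons x t ih => rw [List.foldl_cons, List.foldl_cons, h, ih]

-- On the filtered list, A's branching collapses to the running-max fold
-- (PySem.List.max? is definitionally that fold).
theorem pv_branches_eq_fold (l : List String) :
    (if l.length = 1 then l.headD ""
     else if l.length > 1 then (PySem.List.max? l (fun t => PySem.Str.len t)).getD "unknown"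
     else "unknown")
    = (l.foldl (pvStep (fun t => PySem.Str.len t)) (none : Option String)).getD "unknown" := by
  match l with
  | [] => rfl
  | [x] => simp [pvStep]
  | x :: y :: t =>
    have h2 : (x :: y :: t).length > 1 := by simp
    have h1 : ¬ (x :: y :: t).length = 1 := by omega
    simp only [h1, if_false, h2, if_true, PySem.List.max?]
    exact congrArg (fun o : Option String => o.getD "unknown")
      (pv_foldl_ext _ _ (fun b a => by cases b <;> rfl) _ _)

-- first p-element after inserting x into a key-descending list = one running-max step
theorem pv_find?_insertBy {α : Type} (key : α → Int) (p : α → Bool) (x : α) (ys : List α)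
    (h : ys.Pairwise (fun a b => key b ≤ key a)) :
    (PySem.List.insertBy (fun a b => decide (key b < key a)) x ys).find? p =
    (if p x then pvStep key (ys.find? p) x else ys.find? p) := by
  induction ys with
  | nil =>
    by_cases hp : p x <;> simp [PySem.List.insertBy, List.find?, pvStep, hp]
  | cons y t ih =>
    have hy : ∀ b ∈ t, key b ≤ key y := fun b hb => (List.pairwise_cons.mp h).1 b hb
    have ht : t.Pairwise (fun a b => key b ≤ key a) := (List.pairwise_cons.mp h).2
    by_cases hxy : key y < key x
    · simp only [PySem.List.insertBy, hxy, decide_true, if_true]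
      by_cases hp : p x
      · rw [List.find?_cons_of_pos hp]
        simp only [hp, if_true]
        cases hf : (y :: t).find? p with
        | none => rfl
        | some b =>
          have hb : b ∈ y :: t := List.mem_of_find?_eq_some hf
          have hlt : key b < key x := by
            rcases List.mem_cons.mp hb with h1 | h1
            · rw [h1]; exact hxy
            · exact lt_of_le_of_lt (hy b h1) hxy
          simp [pvStep, hlt]
      · rw [List.find?_cons_of_neg hp]
        simp [hp]
    · simp only [PySem.List.insertBy, hxy, decide_false, Bool.false_eq_true, if_false]
      by_cases hpy : p y
      · rw [List.find?_cons_of_pos hpy, List.find?_cons_of_pos hpy]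
        by_cases hp : p x <;> simp [pvStep, hp, hxy]
      · rw [List.find?_cons_of_neg hpy, List.find?_cons_of_neg hpy]
        exact ih ht

-- the first matching element of the length-descending stable sort is A's running max
theorem pv_find?_sorted {α : Type} (key : α → Int) (p : α → Bool) (xs : List α) :
    (PySem.List.sorted xs key true).find? p =
    xs.foldl (fun best task => if p task then pvStep key best task else best) (none : Option α) := by
  induction xs using List.reverseRecOn with
  | nil => rfl
  | append_singleton xs x ih =>
    have hs : PySem.List.sorted (xs ++ [x]) key true
        = PySem.List.insertBy (fun a b => decide (key b < key a)) x
            (PySem.List.sorted xs key true) := by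
      rw [PySem.List.sorted_rev_eq_foldl_insertBy, PySem.List.sorted_rev_eq_foldl_insertBy,
        List.foldl_append]
      rfl
    rw [hs, pv_find?_insertBy key p x _ (PySem.List.sorted_pairwise_rev xs key),
      List.foldl_append, ih]
    rfl

theorem pv_match_getD (o : Option String) :
    (match o with | some t => t | none => "unknown") = o.getD "unknown" := by
  cases o <;> rfl

-- ===== VERDICT (by name: the statement is the Claim_ definition above) =====
theorem what_task_is_this_output_spec : Claim_equal_what_task_is_this_output := by
  intro output_name tasks _
  unfold Spec_what_task_is_this_output what_task_is_this_output what_task_is_this_output_alt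
  rw [pv_foldl_append_filter, pv_find?_sorted, pv_match_getD,
    pv_foldl_if_filter (fun task => PySem.Str.isIn task output_name)]
  simp only [List.nil_append]
  exact pv_branches_eq_fold (tasks.filter (fun task => PySem.Str.isIn task output_name))
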